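-- pv_equiv track=rewrite | github.com/thealper2/codewars-solutions | 7-kyu/mutate_my_strings.py | mutate_my_strings
-- ===== SOURCE A (Python) =====
-- def mutate_my_strings(s1, s2):
--     if s1 == s2:
--         return s1 + "\n"
--
--     result = [s1]
--     current = list(s1)
--     target = list(s2)
--
--     for i in range(len(current)):
--         if current[i] != target[i]:
--             current[i] = target[i]
--             result.append("".join(current))
--
--     return "\n".join(result) + "\n"
-- ===== SOURCE B (Python) =====
-- def mutate_my_strings(s1, s2):
--     if s1 == s2:
--         return s1 + "\n"
--     snapshots = [s2[:i + 1] + s1[i + 1:] for i in range(len(s1)) if s1[i] != s2[i]]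
--     return "\n".join([s1] + snapshots) + "\n"
-- ===== Notes on version B (the rewrite author's own statement) =====
-- stated objective: simpler
-- what changed: Replaces the mutated character-buffer accumulator with a stateless comprehension that recomputes each snapshot as a closed-form slice (prefix of s2 plus suffix of s1).
import Mathlib
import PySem

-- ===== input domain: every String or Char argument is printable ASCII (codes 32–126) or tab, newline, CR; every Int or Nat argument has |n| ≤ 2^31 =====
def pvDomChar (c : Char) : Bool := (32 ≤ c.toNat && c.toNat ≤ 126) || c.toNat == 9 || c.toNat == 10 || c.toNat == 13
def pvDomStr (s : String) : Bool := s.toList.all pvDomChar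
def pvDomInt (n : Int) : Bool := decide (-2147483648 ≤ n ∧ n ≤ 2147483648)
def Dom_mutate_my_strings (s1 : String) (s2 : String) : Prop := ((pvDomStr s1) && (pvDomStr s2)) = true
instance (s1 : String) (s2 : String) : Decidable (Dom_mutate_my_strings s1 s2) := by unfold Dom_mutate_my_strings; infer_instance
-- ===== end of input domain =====

-- B drops A's mutated character buffer and builds each snapshot as a closed-form slice (simpler); same return value on Pre_.

-- ===== PORT A =====
-- A's loop body: state is (result, current); Python's `current[i]` / `target[i]` would raise
-- IndexError out of range (such inputs are excluded by Pre_); the port reads with getD.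
def pvStepA (target : List Char) (st : List String × List Char) (i : Nat) : List String × List Char :=
  if st.2.getD i ' ' ≠ target.getD i ' ' then
    let cur' := st.2.set i (target.getD i ' ')
    (st.1 ++ [String.ofList cur'], cur')
  else st

def mutate_my_strings (s1 : String) (s2 : String) : String :=
  if s1 = s2 then s1 ++ "\n"
  else
    let target := s2.toList
    let st := (List.range s1.toList.length).foldl (pvStepA target) ([s1], s1.toList)
    String.intercalate "\n" st.1 ++ "\n"

-- ===== PORT B =====
def mutate_my_strings_alt (s1 : String) (s2 : String) : String :=
  if s1 = s2 then s1 ++ "\n"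
  else
    let l1 := s1.toList
    let l2 := s2.toList
    let snapshots := ((List.range l1.length).filter
        (fun i => l1.getD i ' ' ≠ l2.getD i ' ')).map
      (fun i => String.ofList (l2.take (i + 1) ++ l1.drop (i + 1)))
    String.intercalate "\n" (s1 :: snapshots) ++ "\n"

-- ===== PRECONDITION & SPEC =====
-- Pre_ excludes exactly the inputs where s1 is longer than s2: there Python A raises IndexError
-- (as does B).
def Pre_mutate_my_strings (s1 : String) (s2 : String) : Prop := s1.toList.length ≤ s2.toList.length
instance (s1 : String) (s2 : String) : Decidable (Pre_mutate_my_strings s1 s2) := by unfold Pre_mutate_my_strings; infer_instance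
def pvWitness_mutate_my_strings : String × String := ("abc", "axcd")

def Spec_mutate_my_strings (s1 : String) (s2 : String) (out : String) : Prop := out = mutate_my_strings_alt s1 s2
instance (s1 : String) (s2 : String) (out : String) : Decidable (Spec_mutate_my_strings s1 s2 out) := by unfold Spec_mutate_my_strings; infer_instance

-- ===== CLAIM (what is proved, stated in full; the proofs are below) =====
def Claim_equal_mutate_my_strings : Prop := ∀ (s1 : String) (s2 : String), Dom_mutate_my_strings s1 s2 → Pre_mutate_my_strings s1 s2 → Spec_mutate_my_strings s1 s2 (mutate_my_strings s1 s2)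

-- ===== LEMMAS AND PROOFS =====

-- After processing indices < k, A's buffer is exactly l2.take k ++ l1.drop k; these three
-- lemmas give the buffer's value at k and how it evolves in each branch.
lemma pv_getD_mid (l1 l2 : List Char) (h : l1.length ≤ l2.length) (k : Nat) (hk : k < l1.length) :
    (l2.take k ++ l1.drop k).getD k ' ' = l1.getD k ' ' := by
  have hk2 : k < l2.length := lt_of_lt_of_le hk h
  have hlen : (l2.take k).length = k := by simp; omega
  rw [List.getD_append_right _ _ _ _ (le_of_eq hlen), hlen, Nat.sub_self,
      List.drop_eq_getElem_cons hk]
  simp [hk]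

lemma pv_set_eq (l1 l2 : List Char) (h : l1.length ≤ l2.length) (k : Nat) (hk : k < l1.length) :
    (l2.take k ++ l1.drop k).set k (l2.getD k ' ') = l2.take (k + 1) ++ l1.drop (k + 1) := by
  have hk2 : k < l2.length := lt_of_lt_of_le hk h
  have hlen : (l2.take k).length = k := by simp; omega
  rw [List.set_append_right _ _ (le_of_eq hlen), hlen, Nat.sub_self,
      ← List.take_append_getElem hk2, List.append_assoc]
  rw [List.getD_eq_getElem l2 ' ' hk2, List.drop_eq_getElem_cons hk]
  rfl

lemma pv_same (l1 l2 : List Char) (h : l1.length ≤ l2.length) (k : Nat) (hk : k < l1.length)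
    (hd : l1.getD k ' ' = l2.getD k ' ') :
    l2.take k ++ l1.drop k = l2.take (k + 1) ++ l1.drop (k + 1) := by
  have hk2 : k < l2.length := lt_of_lt_of_le hk h
  rw [List.drop_eq_getElem_cons hk, ← List.take_append_getElem hk2, List.append_assoc]
  have : l1[k] = l2[k] := by
    have h1 := List.getD_eq_getElem l1 ' ' hk
    have h2 := List.getD_eq_getElem l2 ' ' hk2
    rw [h1, h2] at hd; exact hd
  simp [this]

-- Loop invariant: starting from buffer l2.take k ++ l1.drop k, A's fold over the remaining
-- indices appends exactly B's closed-form snapshots for the differing indices.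
lemma pv_loop (l1 l2 : List Char) (h : l1.length ≤ l2.length) :
    ∀ (m k : Nat), k + m = l1.length → ∀ (res : List String),
    ((List.range' k m).foldl (pvStepA l2) (res, l2.take k ++ l1.drop k)).1 =
      res ++ ((List.range' k m).filter
          (fun i => l1.getD i ' ' ≠ l2.getD i ' ')).map
        (fun i => String.ofList (l2.take (i + 1) ++ l1.drop (i + 1))) := by
  intro m
  induction m with
  | zero => intro k _ res; simp
  | succ m ih =>
    intro k hk res
    have hklt : k < l1.length := by omega
    rw [List.range'_succ]
    simp only [List.foldl_cons, List.filter_cons]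
    have hcur : (l2.take k ++ l1.drop k).getD k ' ' = l1.getD k ' ' :=
      pv_getD_mid l1 l2 h k hklt
    by_cases hd : l1.getD k ' ' ≠ l2.getD k ' '
    · have hstep : pvStepA l2 (res, l2.take k ++ l1.drop k) k =
          (res ++ [String.ofList (l2.take (k + 1) ++ l1.drop (k + 1))],
            l2.take (k + 1) ++ l1.drop (k + 1)) := by
        simp only [pvStepA, hcur, if_pos hd]
        rw [pv_set_eq l1 l2 h k hklt]
      rw [hstep, ih (k + 1) (by omega), if_pos (by simpa using hd)]
      simp
    · rw [not_not] at hd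
      have hstep : pvStepA l2 (res, l2.take k ++ l1.drop k) k =
          (res, l2.take (k + 1) ++ l1.drop (k + 1)) := by
        simp only [pvStepA, hcur, hd]
        simp [pv_same l1 l2 h k hklt hd]
      rw [hstep, ih (k + 1) (by omega), if_neg (by simpa using hd)]

-- ===== VERDICT (by name: the statement is the Claim_ definition above) =====
theorem mutate_my_strings_spec : Claim_equal_mutate_my_strings := by
  intro s1 s2 _ hpre
  unfold Pre_mutate_my_strings at hpre
  unfold Spec_mutate_my_strings mutate_my_strings mutate_my_strings_alt
  by_cases he : s1 = s2
  · simp [he]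
  · simp only [if_neg he]
    have h := pv_loop s1.toList s2.toList hpre s1.toList.length 0 (by omega) [s1]
    simp only [List.take_zero, List.drop_zero, List.nil_append] at h
    rw [List.range_eq_range', h]
    rfl
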